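-- pv_equiv track=rewrite | github.com/AgentD1/uwgigamejam2020 | World.py | tile_rotated_absolute
-- ===== SOURCE A (Python) =====
-- def tile_rotated_absolute(tile, rotation_direction):
--     if tile in ["batteryMain", "batteryNotMain", "batteryOff", ""]:
--         return tile
--
--     tile_append = tile[-1]
--     tile = tile[0:-1]
--     compression = {("ud", "lr"): "hor",
--                    ("ul", "ur", "dl", "dr"): "turn",
--                    ("ulr", "udl", "udr", "dlr"): "3turn",
--                    ("udlr",): "4turn"}
--     decompression = {("hor", "left"): "lr",  # Straight tiles
--                      ("hor", "right"): "lr",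
--                      ("hor", "up"): "ud",
--                      ("hor", "down"): "ud",
--                      ("turn", "left"): "dl",  # Turn tiles
--                      ("turn", "right"): "ur",
--                      ("turn", "up"): "ul",
--                      ("turn", "down"): "dr",
--                      ("3turn", "left"): "udl",  # 3Turn tiles
--                      ("3turn", "right"): "udr",
--                      ("3turn", "up"): "ulr",
--                      ("3turn", "down"): "dlr",
--                      ("4turn", "down"): "udlr",  # 4Turn tile
--                      ("4turn", "left"): "udlr",
--                      ("4turn", "up"): "udlr",
--                      ("4turn", "right"): "udlr"
--                      }
--     for (key, value) in compression.items():
--         if tile in key: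
--             return decompression[(value, rotation_direction)] + tile_append
--     return "error"
-- ===== SOURCE B (Python) =====
-- # Same mapping computed by rotation: classify the prefix, rotate a canonical
-- # orientation clockwise per direction, and emit letters in fixed u,d,l,r order.
--
-- _VALID = ("ud", "lr", "ul", "ur", "dl", "dr", "ulr", "udl", "udr", "dlr", "udlr")
-- _CW = {"u": "r", "r": "d", "d": "l", "l": "u"}
-- _STEPS = {"up": 0, "right": 1, "down": 2, "left": 3}
--
--
-- def tile_rotated_absolute(tile, rotation_direction):
--     if tile in ("batteryMain", "batteryNotMain", "batteryOff", ""):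
--         return tile
--     prefix, suffix = tile[:-1], tile[-1]
--     if prefix not in _VALID:
--         return "error"
--     if len(prefix) == 4:
--         canon = "udlr"
--     elif len(prefix) == 3:
--         canon = "ulr"
--     elif set(prefix) in ({"u", "d"}, {"l", "r"}):
--         canon = "ud"
--     else:
--         canon = "ul"
--     letters = set(canon)
--     for _ in range(_STEPS[rotation_direction]):
--         letters = {_CW[c] for c in letters}
--     return "".join(c for c in "udlr" if c in letters) + suffix
-- ===== Notes on version B (the rewrite author's own statement) =====
-- stated objective: alternative
-- what changed: B replaces A's compression/decompression lookup tables by classifying the tile prefix against the list of valid codes, rotating a canonical 'up' orientation clockwise 0-3 times per direction, and emitting the letters in fixed u,d,l,r order.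
import Mathlib
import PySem

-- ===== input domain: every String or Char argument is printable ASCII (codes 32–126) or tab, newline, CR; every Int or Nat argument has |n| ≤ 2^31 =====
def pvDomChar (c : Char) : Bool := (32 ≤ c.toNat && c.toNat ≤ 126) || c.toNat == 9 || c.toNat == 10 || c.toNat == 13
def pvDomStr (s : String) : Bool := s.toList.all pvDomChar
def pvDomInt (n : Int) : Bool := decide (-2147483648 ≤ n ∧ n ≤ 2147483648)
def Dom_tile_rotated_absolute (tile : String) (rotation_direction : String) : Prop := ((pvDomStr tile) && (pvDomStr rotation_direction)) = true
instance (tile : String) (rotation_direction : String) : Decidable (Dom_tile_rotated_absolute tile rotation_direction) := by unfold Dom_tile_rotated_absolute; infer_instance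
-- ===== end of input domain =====

-- B replaces A's two lookup tables by classifying the prefix and rotating a canonical
-- orientation clockwise (objective: alternative decomposition, same cost).

-- ===== PORT A =====
-- the `compression` dict of A as its items list (tuple keys as lists of strings-as-char-lists)
def pvCompression : List (List (List Char) × String) :=
  [(["ud".toList, "lr".toList], "hor"),
   (["ul".toList, "ur".toList, "dl".toList, "dr".toList], "turn"),
   (["ulr".toList, "udl".toList, "udr".toList, "dlr".toList], "3turn"),
   (["udlr".toList], "4turn")]

def pvDecompression : PySem.Dict (String × String) String :=
  PySem.Dict.ofList
    [(("hor", "left"), "lr"), (("hor", "right"), "lr"),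
     (("hor", "up"), "ud"), (("hor", "down"), "ud"),
     (("turn", "left"), "dl"), (("turn", "right"), "ur"),
     (("turn", "up"), "ul"), (("turn", "down"), "dr"),
     (("3turn", "left"), "udl"), (("3turn", "right"), "udr"),
     (("3turn", "up"), "ulr"), (("3turn", "down"), "dlr"),
     (("4turn", "down"), "udlr"), (("4turn", "left"), "udlr"),
     (("4turn", "up"), "udlr"), (("4turn", "right"), "udlr")]

-- A's `for (key, value) in compression.items(): if tile in key: return …` loop with early return;
-- the dict lookup raises KeyError on a rotation_direction outside the table (excluded by Pre_; `.getD ""` there)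
def pvALoop (t : List Char) (rot : String) (ap : List Char) :
    List (List (List Char) × String) → String
  | [] => "error"
  | (key, value) :: rest =>
      if t ∈ key then
        String.ofList ((pvDecompression.getD (value, rot) "").toList ++ ap)
      else pvALoop t rot ap rest

def tile_rotated_absolute (tile : String) (rotation_direction : String) : String :=
  if tile ∈ (["batteryMain", "batteryNotMain", "batteryOff", ""] : List String) then
    tile
  else
    let cs := tile.toList
    -- tile[-1] (a 1-char string); the guard guarantees cs ≠ [], so the `.getD []` default is unreachable
    let tile_append : List Char := ((PySem.List.pyGet? cs (-1)).map (fun c => [c])).getD []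
    let t := PySem.List.slice cs (some 0) (some (-1))      -- tile[0:-1]
    pvALoop t rotation_direction tile_append pvCompression

-- ===== PORT B =====
def pvValid : List (List Char) :=
  ["ud".toList, "lr".toList, "ul".toList, "ur".toList, "dl".toList, "dr".toList,
   "ulr".toList, "udl".toList, "udr".toList, "dlr".toList, "udlr".toList]

def pvCW (c : Char) : Char :=
  if c = 'u' then 'r' else if c = 'r' then 'd' else if c = 'd' then 'l' else 'u'

-- _STEPS[rotation_direction]; KeyError on other strings (excluded by Pre_; `.getD 0` there)
def pvSteps (rot : String) : Nat :=
  (PySem.Dict.ofList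
    [("up", (0 : Nat)), ("right", 1), ("down", 2), ("left", 3)]).getD rot 0

def tile_rotated_absolute_alt (tile : String) (rotation_direction : String) : String :=
  if tile ∈ (["batteryMain", "batteryNotMain", "batteryOff", ""] : List String) then
    tile
  else
    let cs := tile.toList
    let pfx := PySem.List.slice cs (some 0) (some (-1))   -- tile[:-1]
    let suffix : List Char := ((PySem.List.pyGet? cs (-1)).map (fun c => [c])).getD []
    if pfx ∉ pvValid then "error"
    else
      let canon : List Char :=
        if pfx.length = 4 then "udlr".toList
        else if pfx.length = 3 then "ulr".toList
        else if PySem.Set.equal (PySem.Set.ofList pfx) (PySem.Set.ofList "ud".toList) ||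
                PySem.Set.equal (PySem.Set.ofList pfx) (PySem.Set.ofList "lr".toList) then
          "ud".toList
        else "ul".toList
      let letters :=
        (List.range (pvSteps rotation_direction)).foldl
          (fun s _ => PySem.Set.ofList (s.map pvCW)) (PySem.Set.ofList canon)
      String.ofList (("udlr".toList.filter (fun c => c ∈ letters)) ++ suffix)

-- ===== PRECONDITION & SPEC =====
-- Pre_ excludes exactly the inputs where BOTH Pythons raise KeyError: a recognised
-- tile prefix together with a rotation_direction outside {up, down, left, right}.
def Pre_tile_rotated_absolute (tile : String) (rotation_direction : String) : Prop :=
  tile ∈ (["batteryMain", "batteryNotMain", "batteryOff", ""] : List String) ∨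
  tile.toList.dropLast ∉ pvValid ∨
  rotation_direction ∈ (["up", "down", "left", "right"] : List String)

instance (tile : String) (rotation_direction : String) :
    Decidable (Pre_tile_rotated_absolute tile rotation_direction) := by
  unfold Pre_tile_rotated_absolute; infer_instance

def pvWitness_tile_rotated_absolute : String × String := ("udH", "left")

def Spec_tile_rotated_absolute (tile : String) (rotation_direction : String) (out : String) : Prop :=
  out = tile_rotated_absolute_alt tile rotation_direction

instance (tile : String) (rotation_direction : String) (out : String) :
    Decidable (Spec_tile_rotated_absolute tile rotation_direction out) := by
  unfold Spec_tile_rotated_absolute; infer_instance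

-- ===== CLAIM (what is proved, stated in full; the proofs are below) =====
def Claim_equal_tile_rotated_absolute : Prop :=
  ∀ (tile : String) (rotation_direction : String),
    Dom_tile_rotated_absolute tile rotation_direction →
    Pre_tile_rotated_absolute tile rotation_direction →
    Spec_tile_rotated_absolute tile rotation_direction (tile_rotated_absolute tile rotation_direction)

-- ===== LEMMAS AND PROOFS =====

-- ===== VERDICT (by name: the statement is the Claim_ definition above) =====
theorem tile_rotated_absolute_spec : Claim_equal_tile_rotated_absolute := by
  intro tile rot _ hpre
  unfold Spec_tile_rotated_absolute
  by_cases hb : tile ∈ (["batteryMain", "batteryNotMain", "batteryOff", ""] : List String)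
  · simp [tile_rotated_absolute, tile_rotated_absolute_alt, hb]
  · simp only [tile_rotated_absolute, tile_rotated_absolute_alt, if_neg hb,
      PySem.List.slice_zero_start, PySem.List.slice_to_neg_one]
    by_cases hv : tile.toList.dropLast ∈ pvValid
    · have hrot : rot = "up" ∨ rot = "down" ∨ rot = "left" ∨ rot = "right" := by
        rcases hpre with h | h | h
        · exact absurd h hb
        · exact absurd hv h
        · simpa using h
      generalize ((PySem.List.pyGet? tile.toList (-1)).map (fun c => [c])).getD [] = ap
      generalize hp : tile.toList.dropLast = p at hv
      simp only [pvValid, List.mem_cons, List.not_mem_nil, or_false] at hv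
      rcases hv with h | h | h | h | h | h | h | h | h | h | h <;> subst h <;>
        rcases hrot with h | h | h | h <;> subst h <;> rfl
    · simp [pvValid] at hv
      obtain ⟨h1, h2, h3, h4, h5, h6, h7, h8, h9, h10, h11⟩ := hv
      simp [pvALoop, pvCompression, pvValid, h1, h2, h3, h4, h5, h6, h7, h8, h9, h10, h11]
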